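-- pv_equiv track=rewrite | github.com/Pcssai7093/nlp-project-2022 | pyt.py | genBigrams
-- ===== SOURCE A (Python) =====
-- def genBigrams(i):
--     str=[]
--     firstLast=''
--     firstLast=i[len(i)-1]+i[0]
--     str.append(firstLast)
--     for j in range(0,len(i)-1):
--             str.append(i[j:j+2])
--     return str
-- ===== SOURCE B (Python) =====
-- def genBigrams(i):
--     rot = i[-1] + i[:-1]
--     return [a + b for a, b in zip(rot, i)]
-- ===== Notes on version B (the rewrite author's own statement) =====
-- stated objective: simpler
-- what changed: B rotates the string right by one (last char prepended to i[:-1]) and zips it with i, producing all bigrams including the wraparound pair in one uniform pass, instead of A's special-cased first element plus an index loop over slices.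
import Mathlib
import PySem

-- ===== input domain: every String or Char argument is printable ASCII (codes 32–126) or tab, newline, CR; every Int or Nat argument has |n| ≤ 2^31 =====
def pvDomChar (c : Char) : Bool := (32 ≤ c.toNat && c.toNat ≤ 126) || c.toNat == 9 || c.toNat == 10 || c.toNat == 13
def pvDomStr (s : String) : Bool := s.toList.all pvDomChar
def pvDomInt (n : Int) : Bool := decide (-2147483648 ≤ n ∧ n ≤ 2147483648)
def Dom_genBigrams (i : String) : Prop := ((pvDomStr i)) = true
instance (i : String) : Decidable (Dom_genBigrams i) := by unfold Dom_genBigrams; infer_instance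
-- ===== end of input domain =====

-- B builds the rotated string (last char + i[:-1]) and zips it with i: one uniform pass
-- instead of A's special-cased wraparound element followed by an index loop over slices.


-- ===== PORT A =====
-- firstLast = i[len(i)-1] + i[0]; then append i[j:j+2] for j in range(0, len(i)-1)
def genBigrams (i : String) : List String :=
  match PySem.Str.pyGet? i (PySem.Str.len i - 1), PySem.Str.pyGet? i 0 with
  | some a, some b =>
      let str : List String := [String.ofList [a, b]]
      (PySem.List.pyRange 0 (PySem.Str.len i - 1) 1).foldl
        (fun acc j => acc ++ [PySem.Str.slice i (some j) (some (j + 2))]) str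
  | _, _ => []  -- i[len(i)-1] / i[0] raise IndexError on the empty string (excluded by Pre_)

-- ===== PORT B =====
-- rot = i[-1] + i[:-1]; return [a+b for a,b in zip(rot, i)]
def genBigrams_alt (i : String) : List String :=
  match PySem.Str.pyGet? i (-1) with
  | some c =>
      let rot : List Char := c :: (PySem.Str.slice i none (some (-1))).toList
      (rot.zip i.toList).map (fun p => String.ofList [p.1, p.2])
  | none => []  -- i[-1] raises IndexError on the empty string (excluded by Pre_)

-- ===== PRECONDITION & SPEC =====
-- A raises IndexError (i[0]) on the empty string; B raises there too; excluded.
def Pre_genBigrams (i : String) : Prop := i ≠ ""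
instance (i : String) : Decidable (Pre_genBigrams i) := by unfold Pre_genBigrams; infer_instance
def pvWitness_genBigrams : String := "ab"

def Spec_genBigrams (i : String) (out : List String) : Prop := out = genBigrams_alt i
instance (i : String) (out : List String) : Decidable (Spec_genBigrams i out) := by unfold Spec_genBigrams; infer_instance

-- ===== CLAIM (what is proved, stated in full; the proofs are below) =====
def Claim_equal_genBigrams : Prop := ∀ (i : String), Dom_genBigrams i → Pre_genBigrams i → Spec_genBigrams i (genBigrams i)

-- ===== LEMMAS AND PROOFS =====

-- A's slice at index k, for k < len-1, is the two-character window [l[k], l[k+1]];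
-- listed over all k these are exactly the pairs B reads off zip(dropLast, tail).
lemma bigram_slices_eq_zip (l : List Char) :
    (List.range (l.length - 1)).map (fun k => (l.drop k).take 2) =
      (l.dropLast.zip l.tail).map (fun p => [p.1, p.2]) := by
  induction l with
  | nil => simp
  | cons x t ih =>
    cases t with
    | nil => simp
    | cons y t' =>
      simp only [List.length_cons, Nat.add_sub_cancel, List.range_succ_eq_map,
        List.map_cons, List.map_map]
      rw [show ((x :: y :: t').dropLast) = x :: (y :: t').dropLast from rfl,
        List.tail_cons, List.zip_cons_cons, List.map_cons]
      have := ih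
      simp only [List.length_cons, Nat.add_sub_cancel, List.tail_cons] at this
      rw [← this]
      simp [Function.comp_def, List.drop_succ_cons]

lemma slice_window (l : List Char) (k : Nat) :
    PySem.List.slice l (some (k:Int)) (some ((k:Int)+2)) = (l.drop k).take 2 := by
  rw [PySem.List.slice_toNat]
  · congr 1; omega
  · positivity
  · positivity

-- A's whole loop, as the list of two-character windows indexed by List.range.
lemma slices_as_windows (i : String) (n : Nat) :
    (PySem.List.pyRange 0 (n:Int) 1).map (fun j => PySem.Str.slice i (some j) (some (j+2)))
      = (List.range n).map (fun k => String.ofList ((i.toList.drop k).take 2)) := by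
  rw [PySem.List.pyRange_one]
  simp only [sub_zero, Int.toNat_natCast, List.map_map]
  apply List.map_congr_left
  intro k _
  simp only [Function.comp_apply, zero_add]
  calc PySem.Str.slice i (some (k:Int)) (some ((k:Int) + 2))
      = String.ofList (PySem.List.slice i.toList (some (k:Int)) (some ((k:Int) + 2))) := rfl
    _ = String.ofList ((i.toList.drop k).take 2) := by rw [slice_window]

theorem genBigrams_spec : Claim_equal_genBigrams := by
  intro i _ hpre
  unfold Spec_genBigrams genBigrams genBigrams_alt
  have hl : i.toList ≠ [] := fun h => hpre (String.toList_eq_nil_iff.mp h)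
  have hp : 0 < i.toList.length := List.length_pos_iff.mpr hl
  have hlast : PySem.Str.pyGet? i (PySem.Str.len i - 1) = i.toList.getLast? := by
    simp only [pysem]
    have h : ((i.toList.length : Int) - 1) = ((i.toList.length - 1 : Nat) : Int) := by omega
    rw [h, PySem.List.pyGet?_natCast, ← List.getLast?_eq_getElem?]
  have hneg : PySem.Str.pyGet? i (-1) = i.toList.getLast? := by
    simp only [pysem, PySem.List.pyGet?_neg_one]
  have hzero : PySem.Str.pyGet? i 0 = i.toList[0]? := by
    have h : (0:Int) = ((0:Nat):Int) := rfl
    simp only [pysem, h, PySem.List.pyGet?_natCast]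
  obtain ⟨c, hc⟩ := Option.isSome_iff_exists.mp (List.getLast?_isSome.mpr hl)
  obtain ⟨x, t, hxt⟩ := List.exists_cons_of_ne_nil hl
  have hx0 : i.toList[0]? = some x := by rw [hxt]; rfl
  rw [hlast, hneg, hzero, hc, hx0]
  simp only [PySem.List.foldl_append_singleton_eq_map, List.singleton_append]
  rw [PySem.Str.slice_to_neg_one]
  -- A's range of slices as a map over List.range
  have hn : PySem.Str.len i - 1 = ((i.toList.length - 1 : Nat) : Int) := by
    simp only [pysem]; omega
  rw [hn, slices_as_windows]
  -- B side: peel the wraparound pair off the zip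
  rw [hxt, show ((c :: (x :: t).dropLast).zip (x :: t)) = (c, x) :: ((x :: t).dropLast.zip t)
      from List.zip_cons_cons .., List.map_cons]
  congr 1
  have key := congrArg (List.map String.ofList) (bigram_slices_eq_zip (x :: t))
  simp only [List.map_map] at key
  simpa [Function.comp_def] using key
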